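/- GENERATED by farm/mkstatement.py from design/units.split.tsv — do not edit.
   THE SPLIT of the proof unit `start_decoder.C13` into `start_decoder.C13a`, `start_decoder.C13b`, `start_decoder.C13c`, `start_decoder.C13d`: the children's statements give the parent's
   UNCHANGED statement (so nothing above the parent — callers, compositions — is touched by the split). -/
import Vorbis.Spec.StartDecoderC13
import Vorbis.Spec.Units.start_decoder_C13
import Vorbis.Spec.Units.start_decoder_C13a
import Vorbis.Spec.Units.start_decoder_C13b
import Vorbis.Spec.Units.start_decoder_C13c
import Vorbis.Spec.Units.start_decoder_C13d
namespace Vorbis.Spec.Splits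
open X86 X86.User Asan

/-- The children of the split unit `start_decoder.C13` prove it, by `Vorbis.Spec.StartDecoder.SegC13.of_parts`. -/
theorem start_decoder_C13
    (h_start_decoder_C13a : Vorbis.Spec.start_decoder_C13a.Statement)
    (h_start_decoder_C13b : Vorbis.Spec.start_decoder_C13b.Statement)
    (h_start_decoder_C13c : Vorbis.Spec.start_decoder_C13c.Statement)
    (h_start_decoder_C13d : Vorbis.Spec.start_decoder_C13d.Statement) :
    Vorbis.Spec.start_decoder_C13.Statement := by
  intro Lay _hLay μ _hμ u₀ _hcode _h_asan_load4_noabort _h_asan_load2_noabort _h_asan_store4_noabort _h_asan_load1_noabort _h_setup_temp_free _h_error _h_asan_load8_noabort _h_asan_store1_noabort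
  apply Vorbis.Spec.StartDecoder.SegC13.of_parts
  · exact h_start_decoder_C13a Lay _hLay μ _hμ u₀ _hcode _h_asan_load4_noabort _h_asan_load8_noabort _h_asan_store1_noabort
  · exact h_start_decoder_C13b Lay _hLay μ _hμ u₀ _hcode _h_asan_load4_noabort
  · exact h_start_decoder_C13c Lay _hLay μ _hμ u₀ _hcode _h_asan_load4_noabort _h_asan_load2_noabort _h_asan_store4_noabort
  · exact h_start_decoder_C13d Lay _hLay μ _hμ u₀ _hcode _h_asan_load1_noabort _h_setup_temp_free _h_error

end Vorbis.Spec.Splits
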